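-- pv_equiv track=rewrite | github.com/Lars-Kvan/SOFT0001-KiCad_Project_Manager | ui/views/project_stats_view.py | _checklist_counts
-- ===== SOURCE A (Python) =====
-- def _checklist_counts(checklist):
--     total = 0
--     verified = 0
--     na = 0
--     per_category = {}
--     for cat, rules in checklist.items():
--         if isinstance(rules, dict) and "rules" in rules:
--             rules = rules.get("rules", [])
--         if not isinstance(rules, list):
--             continue
--         c_total = 0
--         c_verified = 0
--         for rule in rules:
--             if not isinstance(rule, dict):
--                 continue
--             status = rule.get("status", "No")
--             if status == "N/A":
--                 na += 1
--                 continue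
--             c_total += 1
--             total += 1
--             if status == "Yes":
--                 c_verified += 1
--                 verified += 1
--         per_category[cat] = (c_verified, c_total)
--     return total, verified, na, per_category
-- ===== SOURCE B (Python) =====
-- def _checklist_counts(checklist):
--     # flatten-and-tabulate: classify every rule into one (category, class) event,
--     # build one frequency table over the events, then read all figures off it
--     def cls(s):
--         return "N/A" if s == "N/A" else ("Yes" if s == "Yes" else "No")
--     cats = []
--     events = []
--     for cat, rules in checklist.items():
--         if isinstance(rules, dict) and "rules" in rules:
--             rules = rules.get("rules", [])
--         if not isinstance(rules, list):
--             continue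
--         cats.append(cat)
--         events += [(cat, cls(r.get("status", "No"))) for r in rules if isinstance(r, dict)]
--     counts = {}
--     for e in events:
--         counts[e] = counts.get(e, 0) + 1
--     total = verified = na = 0
--     per_category = {}
--     for cat in cats:
--         v = counts.get((cat, "Yes"), 0)
--         t = v + counts.get((cat, "No"), 0)
--         per_category[cat] = (v, t)
--         total += t
--         verified += v
--         na += counts.get((cat, "N/A"), 0)
--     return total, verified, na, per_category
-- ===== Notes on version B (the rewrite author's own statement) =====
-- stated objective: alternative
-- what changed: Replaces A's nested loops mutating five running counters with a flatten-and-tabulate algorithm: the checklist is flattened into classified (category, status-class) events, one frequency table is built over those events, and the per-category pairs and global totals are then read off the table by key lookups.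
import Mathlib
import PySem

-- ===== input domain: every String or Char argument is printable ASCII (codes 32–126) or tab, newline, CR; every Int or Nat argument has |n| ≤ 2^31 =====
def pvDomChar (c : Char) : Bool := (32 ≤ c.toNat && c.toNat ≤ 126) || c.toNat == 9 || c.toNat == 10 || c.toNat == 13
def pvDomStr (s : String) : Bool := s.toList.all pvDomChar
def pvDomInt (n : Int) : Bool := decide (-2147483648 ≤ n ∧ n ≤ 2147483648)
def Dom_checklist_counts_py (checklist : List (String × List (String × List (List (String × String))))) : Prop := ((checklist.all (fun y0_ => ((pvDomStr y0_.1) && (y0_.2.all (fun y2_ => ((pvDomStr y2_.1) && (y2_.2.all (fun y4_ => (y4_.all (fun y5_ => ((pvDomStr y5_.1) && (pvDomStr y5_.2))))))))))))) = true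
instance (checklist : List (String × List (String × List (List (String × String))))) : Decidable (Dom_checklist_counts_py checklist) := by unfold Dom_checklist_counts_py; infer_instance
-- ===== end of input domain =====

-- B replaces A's nested counter-mutating loops by flatten-to-events + one frequency table + lookups; same cost, alternative algorithm.

-- ===== PORT A =====
-- literal port of A: one pass mutating (total, verified, na, per_category) with an inner
-- 5-tuple loop; the typed domain makes every inner value a dict and every rule a dict,
-- so the isinstance guards reduce to the 'rules' membership test.
def checklist_counts_py (checklist : List (String × List (String × List (List (String × String))))) : Int × Int × Int × (List (String × Int × Int)) :=
  let st :=
    (PySem.Dict.ofList checklist).items.foldl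
      (fun (st : Int × Int × Int × PySem.Dict String (Int × Int)) catRules =>
        let rulesD := PySem.Dict.ofList catRules.2
        if rulesD.contains "rules" then
          let rules := rulesD.getD "rules" []
          let inner :=
            rules.foldl
              (fun (q : Int × Int × Int × Int × Int) rule =>
                let status := (PySem.Dict.ofList rule).getD "status" "No"
                if status == "N/A" then
                  (q.1, q.2.1, q.2.2.1 + 1, q.2.2.2.1, q.2.2.2.2)
                else if status == "Yes" then
                  (q.1 + 1, q.2.1 + 1, q.2.2.1, q.2.2.2.1 + 1, q.2.2.2.2 + 1)
                else
                  (q.1 + 1, q.2.1, q.2.2.1, q.2.2.2.1 + 1, q.2.2.2.2))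
              (st.1, st.2.1, st.2.2.1, 0, 0)
          (inner.1, inner.2.1, inner.2.2.1,
            st.2.2.2.insert catRules.1 (inner.2.2.2.2, inner.2.2.2.1))
        else st)
      ((0 : Int), (0 : Int), (0 : Int), (PySem.Dict.empty : PySem.Dict String (Int × Int)))
  (st.1, st.2.1, st.2.2.1, st.2.2.2.items)

-- ===== PORT B =====
-- B's status classifier: every rule status becomes exactly one of "Yes" / "No" / "N/A"
def pvCls (s : String) : String :=
  if s == "N/A" then "N/A" else if s == "Yes" then "Yes" else "No"

-- port of B: (1) flatten to valid cats + classified (cat, class) events, (2) one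
-- frequency table over the events (counts[e] = counts.get(e,0)+1 = PySem.Dict.counter),
-- (3) read per-category pairs and totals off the table by key lookups.
def checklist_counts_py_alt (checklist : List (String × List (String × List (List (String × String))))) : Int × Int × Int × (List (String × Int × Int)) :=
  let scan :=
    (PySem.Dict.ofList checklist).items.foldl
      (fun (acc : List String × List (String × String)) p =>
        let rd := PySem.Dict.ofList p.2
        if rd.contains "rules" then
          (acc.1 ++ [p.1],
           acc.2 ++ (rd.getD "rules" []).map
             (fun r => (p.1, pvCls ((PySem.Dict.ofList r).getD "status" "No"))))
        else acc)
      ([], [])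
  let counts := PySem.Dict.counter scan.2
  let res :=
    scan.1.foldl
      (fun (q : Int × Int × Int × PySem.Dict String (Int × Int)) cat =>
        let v := counts.getD (cat, "Yes") 0
        let t := v + counts.getD (cat, "No") 0
        (q.1 + t, q.2.1 + v, q.2.2.1 + counts.getD (cat, "N/A") 0,
          q.2.2.2.insert cat (v, t)))
      ((0 : Int), (0 : Int), (0 : Int), (PySem.Dict.empty : PySem.Dict String (Int × Int)))
  (res.1, res.2.1, res.2.2.1, res.2.2.2.items)

-- ===== PRECONDITION & SPEC =====
def Spec_checklist_counts_py (checklist : List (String × List (String × List (List (String × String))))) (out : Int × Int × Int × (List (String × Int × Int))) : Prop := out = checklist_counts_py_alt checklist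
instance (checklist : List (String × List (String × List (List (String × String))))) (out : Int × Int × Int × (List (String × Int × Int))) : Decidable (Spec_checklist_counts_py checklist out) := by unfold Spec_checklist_counts_py; infer_instance

-- ===== CLAIM (what is proved, stated in full; the proofs are below) =====
def Claim_equal_checklist_counts_py : Prop := ∀ (checklist : List (String × List (String × List (List (String × String))))), Dom_checklist_counts_py checklist → Spec_checklist_counts_py checklist (checklist_counts_py checklist)

-- ===== LEMMAS AND PROOFS =====

-- classified statuses of one category's rules list (given the 'rules' entry)
def pvCs (rules : List (List (String × String))) : List String :=
  rules.map (fun r => pvCls ((PySem.Dict.ofList r).getD "status" "No"))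

-- one category's (verified, total, na) triple, written through the classified counts
def pvTriple (rules : List (String × List (List (String × String)))) : Option (Int × Int × Int) :=
  let rd := PySem.Dict.ofList rules
  if rd.contains "rules" then
    let cs := pvCs (rd.getD "rules" [])
    some (((cs.count "Yes" : Nat) : Int),
          ((cs.count "Yes" : Nat) : Int) + ((cs.count "No" : Nat) : Int),
          ((cs.count "N/A" : Nat) : Int))
  else none

def pvValid (l : List (String × List (String × List (List (String × String))))) :
    List (String × Int × Int × Int) :=
  l.filterMap (fun p => (pvTriple p.2).map (fun s => (p.1, s)))

def pvCats (l : List (String × List (String × List (List (String × String))))) : List String :=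
  l.filterMap (fun p => if (PySem.Dict.ofList p.2).contains "rules" then some p.1 else none)

def pvEvents (l : List (String × List (String × List (List (String × String))))) :
    List (String × String) :=
  l.flatMap (fun p =>
    if (PySem.Dict.ofList p.2).contains "rules" then
      (pvCs ((PySem.Dict.ofList p.2).getD "rules" [])).map (fun c => (p.1, c))
    else [])

-- the inner rule loop of A, named so the lemmas can speak about it
def pvInnerA (rules : List (List (String × String))) (q : Int × Int × Int × Int × Int) : Int × Int × Int × Int × Int :=
  rules.foldl
    (fun (q : Int × Int × Int × Int × Int) rule =>
      let status := (PySem.Dict.ofList rule).getD "status" "No"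
      if status == "N/A" then
        (q.1, q.2.1, q.2.2.1 + 1, q.2.2.2.1, q.2.2.2.2)
      else if status == "Yes" then
        (q.1 + 1, q.2.1 + 1, q.2.2.1, q.2.2.2.1 + 1, q.2.2.2.2 + 1)
      else
        (q.1 + 1, q.2.1, q.2.2.1, q.2.2.2.1 + 1, q.2.2.2.2))
    q

lemma pvInnerA_eq (rules : List (List (String × String))) :
    ∀ (t v n ct cv : Int),
    pvInnerA rules (t, v, n, ct, cv) =
      (t + ((pvCs rules).count "Yes" + (pvCs rules).count "No" : Nat),
       v + ((pvCs rules).count "Yes" : Nat),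
       n + ((pvCs rules).count "N/A" : Nat),
       ct + ((pvCs rules).count "Yes" + (pvCs rules).count "No" : Nat),
       cv + ((pvCs rules).count "Yes" : Nat)) := by
  induction rules with
  | nil => intro t v n ct cv; simp [pvInnerA, pvCs]
  | cons r rs ih =>
    intro t v n ct cv
    simp only [pvInnerA, List.foldl_cons] at ih ⊢
    by_cases hna : (PySem.Dict.ofList r).getD "status" "No" = "N/A"
    · rw [if_pos (by simp [hna])]
      rw [ih]
      simp [pvCs, pvCls, hna, Prod.ext_iff]
      omega
    · by_cases hy : (PySem.Dict.ofList r).getD "status" "No" = "Yes"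
      · rw [if_neg (by simp [hy]), if_pos (by simp [hy])]
        rw [ih]
        simp [pvCs, pvCls, hy, Prod.ext_iff]
        omega
      · rw [if_neg (by simp [hna]), if_neg (by simp [hy])]
        rw [ih]
        simp [pvCs, pvCls, hna, hy, Prod.ext_iff]
        omega

-- A's outer loop body, named
def pvStepA (st : Int × Int × Int × PySem.Dict String (Int × Int))
    (catRules : String × List (String × List (List (String × String)))) :
    Int × Int × Int × PySem.Dict String (Int × Int) :=
  let rulesD := PySem.Dict.ofList catRules.2
  if rulesD.contains "rules" then
    let inner := pvInnerA (rulesD.getD "rules" []) (st.1, st.2.1, st.2.2.1, 0, 0)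
    (inner.1, inner.2.1, inner.2.2.1,
      st.2.2.2.insert catRules.1 (inner.2.2.2.2, inner.2.2.2.1))
  else st

lemma pvMainA (l : List (String × List (String × List (List (String × String))))) :
    ∀ (t v n : Int) (per : PySem.Dict String (Int × Int)),
    (∀ c ∈ l.map Prod.fst, per.contains c = false) →
    (l.map Prod.fst).Nodup →
    l.foldl pvStepA (t, v, n, per) =
      (t + ((pvValid l).map (fun q => q.2.2.1)).sum,
       v + ((pvValid l).map (fun q => q.2.1)).sum,
       n + ((pvValid l).map (fun q => q.2.2.2)).sum,
       PySem.Dict.mk (per.items ++ (pvValid l).map (fun q => (q.1, q.2.1, q.2.2.1)))) := by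
  induction l with
  | nil =>
    intro t v n per _ _
    simp [pvValid]
  | cons p ps ih =>
    intro t v n per hfresh hnd
    simp only [List.map_cons, List.nodup_cons] at hnd
    have hpf : per.contains p.1 = false := hfresh p.1 (by simp)
    simp only [List.foldl_cons]
    by_cases hc : (PySem.Dict.ofList p.2).contains "rules"
    · obtain ⟨y, k, m, hcs⟩ : ∃ y k m : Int, pvTriple p.2 = some (y, k, m) := by
        simp only [pvTriple, hc, if_true]
        exact ⟨_, _, _, rfl⟩
      have h1 := hcs
      simp only [pvTriple, hc, if_true, Option.some.injEq, Prod.mk.injEq] at h1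
      obtain ⟨e1, e2, e3⟩ := h1
      have hstep : pvStepA (t, v, n, per) p = (t + k, v + y, n + m, per.insert p.1 (y, k)) := by
        simp only [pvStepA, hc, if_true, pvInnerA_eq]
        simp only [zero_add]
        rw [← e1, ← e2, ← e3]
        push_cast
        rfl
      have hval : pvValid (p :: ps) = (p.1, y, k, m) :: pvValid ps := by
        simp [pvValid, hcs]
      have hitem : (per.insert p.1 (y, k)).items = per.items ++ [(p.1, (y, k))] := by
        simp [PySem.Dict.items_insert, hpf]
      rw [hstep]
      rw [ih _ _ _ _ ?fresh hnd.2]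
      case fresh =>
        intro c hcmem
        rw [PySem.Dict.contains_insert]
        have : per.contains c = false := hfresh c (by simp [hcmem])
        have hne : c ≠ p.1 := fun h => hnd.1 (h ▸ hcmem)
        simp [this, hne]
      rw [hval]
      simp only [List.map_cons, List.sum_cons, Prod.mk.injEq]
      refine ⟨by ring, by ring, by ring, ?_⟩
      apply PySem.Dict.ext
      simp [hitem]
    · have hstep : pvStepA (t, v, n, per) p = (t, v, n, per) := by
        simp [pvStepA, hc]
      have hval : pvValid (p :: ps) = pvValid ps := by
        simp [pvValid, pvTriple, hc]
      rw [hstep, hval, ih _ _ _ _ (fun c hc => hfresh c (by simp [hc])) hnd.2]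

-- B's scan fold equals (valid cats, events) in closed form
lemma pvScan_eq (l : List (String × List (String × List (List (String × String))))) :
    ∀ (cs : List String) (ev : List (String × String)),
    l.foldl
      (fun (acc : List String × List (String × String)) p =>
        let rd := PySem.Dict.ofList p.2
        if rd.contains "rules" then
          (acc.1 ++ [p.1],
           acc.2 ++ (rd.getD "rules" []).map
             (fun r => (p.1, pvCls ((PySem.Dict.ofList r).getD "status" "No"))))
        else acc)
      (cs, ev) = (cs ++ pvCats l, ev ++ pvEvents l) := by
  induction l with
  | nil => intro cs ev; simp [pvCats, pvEvents]
  | cons p ps ih =>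
    intro cs ev
    simp only [List.foldl_cons]
    by_cases hc : (PySem.Dict.ofList p.2).contains "rules"
    · simp only [hc, if_true]
      rw [ih]
      simp [pvCats, pvEvents, hc, pvCs, List.append_assoc]
    · simp only [hc]
      rw [if_neg (by simp [hc])]
      rw [ih]
      simp [pvCats, pvEvents, hc]

-- events of a list never mention a category outside its keys
lemma pvEvents_count_zero (l : List (String × List (String × List (List (String × String)))))
    (c : String) (x : String) (h : c ∉ l.map Prod.fst) :
    (pvEvents l).count (c, x) = 0 := by
  rw [List.count_eq_zero]
  intro hmem
  simp only [pvEvents, List.mem_flatMap] at hmem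
  obtain ⟨p, hp, hin⟩ := hmem
  by_cases hcnt : (PySem.Dict.ofList p.2).contains "rules"
  · simp only [hcnt, if_true, List.mem_map] at hin
    obtain ⟨s, _, hs⟩ := hin
    have hpc : p.1 = c := (Prod.ext_iff.mp hs).1
    exact h (hpc ▸ List.mem_map_of_mem (f := Prod.fst) hp)
  · simp [hcnt] at hin

lemma pvCount_tag (a : String) (cs : List String) (x : String) :
    (cs.map (fun c => (a, c))).count (a, x) = cs.count x := by
  induction cs with
  | nil => simp
  | cons b bs ih => simp [List.count_cons, ih, Prod.ext_iff]

lemma pvEvents_cons (p : String × List (String × List (List (String × String))))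
    (ps : List (String × List (String × List (List (String × String))))) :
    pvEvents (p :: ps) =
      (if (PySem.Dict.ofList p.2).contains "rules" then
        (pvCs ((PySem.Dict.ofList p.2).getD "rules" [])).map (fun c => (p.1, c))
      else []) ++ pvEvents ps := by
  simp [pvEvents]

-- B's final read-off fold equals the same closed form, given a table agreeing with the
-- event counts of l on all of l's keys
lemma pvMainB (d : PySem.Dict (String × String) Int)
    (l : List (String × List (String × List (List (String × String))))) :
    ∀ (t v n : Int) (per : PySem.Dict String (Int × Int)),
    (∀ c ∈ l.map Prod.fst, ∀ x, d.getD (c, x) 0 = ((pvEvents l).count (c, x) : Int)) →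
    (∀ c ∈ l.map Prod.fst, per.contains c = false) →
    (l.map Prod.fst).Nodup →
    (pvCats l).foldl
      (fun (q : Int × Int × Int × PySem.Dict String (Int × Int)) cat =>
        let v := d.getD (cat, "Yes") 0
        let t := v + d.getD (cat, "No") 0
        (q.1 + t, q.2.1 + v, q.2.2.1 + d.getD (cat, "N/A") 0,
          q.2.2.2.insert cat (v, t)))
      (t, v, n, per) =
      (t + ((pvValid l).map (fun q => q.2.2.1)).sum,
       v + ((pvValid l).map (fun q => q.2.1)).sum,
       n + ((pvValid l).map (fun q => q.2.2.2)).sum,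
       PySem.Dict.mk (per.items ++ (pvValid l).map (fun q => (q.1, q.2.1, q.2.2.1)))) := by
  induction l with
  | nil => intro t v n per _ _ _; simp [pvCats, pvValid]
  | cons p ps ih =>
    intro t v n per hd hfresh hnd
    simp only [List.map_cons, List.nodup_cons] at hnd
    have hpf : per.contains p.1 = false := hfresh p.1 (by simp)
    have hps : ∀ c ∈ ps.map Prod.fst, ∀ x,
        d.getD (c, x) 0 = ((pvEvents ps).count (c, x) : Int) := by
      intro c hcm x
      have hne : c ≠ p.1 := fun h => hnd.1 (h ▸ hcm)
      have hzero : ((if (PySem.Dict.ofList p.2).contains "rules" then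
          (pvCs ((PySem.Dict.ofList p.2).getD "rules" [])).map (fun cc => (p.1, cc)) else
          []).count (c, x)) = 0 := by
        rw [List.count_eq_zero]
        intro hmem
        split at hmem
        · simp only [List.mem_map] at hmem
          obtain ⟨s, _, hs⟩ := hmem
          exact hne ((Prod.ext_iff.mp hs).1.symm)
        · simp at hmem
      rw [hd c (by simp [hcm]) x, pvEvents_cons, List.count_append, hzero]
      simp
    by_cases hc : (PySem.Dict.ofList p.2).contains "rules"
    · obtain ⟨y, k, m, hcs⟩ : ∃ y k m : Int, pvTriple p.2 = some (y, k, m) := by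
        simp only [pvTriple, hc, if_true]
        exact ⟨_, _, _, rfl⟩
      have h1 := hcs
      simp only [pvTriple, hc, if_true, Option.some.injEq, Prod.mk.injEq] at h1
      obtain ⟨e1, e2, e3⟩ := h1
      -- the head category's lookups in d are its own classified counts
      have hlook : ∀ x, d.getD (p.1, x) 0 =
          (((pvCs ((PySem.Dict.ofList p.2).getD "rules" [])).count x : Nat) : Int) := by
        intro x
        rw [hd p.1 (by simp) x, pvEvents_cons, List.count_append,
          pvEvents_count_zero ps p.1 x hnd.1, if_pos hc, pvCount_tag]
        simp
      have hcats : pvCats (p :: ps) = p.1 :: pvCats ps := by simp [pvCats, hc]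
      have hval : pvValid (p :: ps) = (p.1, y, k, m) :: pvValid ps := by
        simp [pvValid, hcs]
      rw [hcats]
      simp only [List.foldl_cons]
      have hstep1 : d.getD (p.1, "Yes") 0 = y := by rw [hlook]; exact e1.symm ▸ rfl
      have hstep2 : d.getD (p.1, "Yes") 0 + d.getD (p.1, "No") 0 = k := by
        rw [hlook, hlook, ← e2]
      have hstep3 : d.getD (p.1, "N/A") 0 = m := by rw [hlook]; exact e3.symm ▸ rfl
      rw [ih _ _ _ _ hps ?fresh hnd.2]
      case fresh =>
        intro c hcmem
        rw [PySem.Dict.contains_insert]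
        have : per.contains c = false := hfresh c (by simp [hcmem])
        have hne : c ≠ p.1 := fun h => hnd.1 (h ▸ hcmem)
        simp [this, hne]
      have hk : y + d.getD (p.1, "No") 0 = k := by rw [← hstep1]; exact hstep2
      have hitem : (per.insert p.1 (d.getD (p.1, "Yes") 0,
          d.getD (p.1, "Yes") 0 + d.getD (p.1, "No") 0)).items =
          per.items ++ [(p.1, (y, k))] := by
        rw [hstep1, hk]
        simp [PySem.Dict.items_insert, hpf]
      rw [hval]
      simp only [List.map_cons, List.sum_cons, Prod.mk.injEq]
      refine ⟨by rw [hstep1, hk]; ring, by rw [hstep1]; ring, by rw [hstep3]; ring, ?_⟩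
      apply PySem.Dict.ext
      simp [hitem]
    · have hcats : pvCats (p :: ps) = pvCats ps := by simp [pvCats, hc]
      have hval : pvValid (p :: ps) = pvValid ps := by simp [pvValid, pvTriple, hc]
      rw [hcats, hval, ih _ _ _ _ hps (fun c hcm => hfresh c (by simp [hcm])) hnd.2]

-- ===== VERDICT (by name: the statement is the Claim_ definition above) =====
theorem checklist_counts_py_spec : Claim_equal_checklist_counts_py := by
  intro checklist _
  unfold Spec_checklist_counts_py checklist_counts_py checklist_counts_py_alt
  have hnd : ((PySem.Dict.ofList checklist).items.map Prod.fst).Nodup := by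
    have := PySem.Dict.nodup_keys_ofList (ps := checklist)
    simpa [PySem.Dict.keys] using this
  set l := (PySem.Dict.ofList checklist).items with hl
  -- A's side
  have hA := pvMainA l 0 0 0 PySem.Dict.empty (fun c _ => by simp) hnd
  have hAfold : l.foldl pvStepA
      ((0 : Int), (0 : Int), (0 : Int), (PySem.Dict.empty : PySem.Dict String (Int × Int))) =
      l.foldl
        (fun (st : Int × Int × Int × PySem.Dict String (Int × Int)) catRules =>
          let rulesD := PySem.Dict.ofList catRules.2
          if rulesD.contains "rules" then
            let rules := rulesD.getD "rules" []
            let inner :=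
              rules.foldl
                (fun (q : Int × Int × Int × Int × Int) rule =>
                  let status := (PySem.Dict.ofList rule).getD "status" "No"
                  if status == "N/A" then
                    (q.1, q.2.1, q.2.2.1 + 1, q.2.2.2.1, q.2.2.2.2)
                  else if status == "Yes" then
                    (q.1 + 1, q.2.1 + 1, q.2.2.1, q.2.2.2.1 + 1, q.2.2.2.2 + 1)
                  else
                    (q.1 + 1, q.2.1, q.2.2.1, q.2.2.2.1 + 1, q.2.2.2.2))
                (st.1, st.2.1, st.2.2.1, 0, 0)
            (inner.1, inner.2.1, inner.2.2.1,
              st.2.2.2.insert catRules.1 (inner.2.2.2.2, inner.2.2.2.1))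
          else st)
        ((0 : Int), (0 : Int), (0 : Int), (PySem.Dict.empty : PySem.Dict String (Int × Int))) := rfl
  -- B's side
  have hScan := pvScan_eq l [] []
  have hB := pvMainB (PySem.Dict.counter (pvEvents l)) l 0 0 0 PySem.Dict.empty
    (fun c _ x => by simp [PySem.Dict.getD_counter]) (fun c _ => by simp) hnd
  rw [← hAfold, hA]
  rw [hScan]
  simp only [List.nil_append]
  rw [hB]
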